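-- pv_equiv track=rewrite | github.com/eskousbol/AdventOfCode | 2023/q15a.py | holiday_hash
-- ===== SOURCE A (Python) =====
-- def holiday_hash(entry):
--   value = 0
--   for letter in entry:
--     ascii_value = ord(letter)
--     value += ascii_value
--     value *= 17
--     value = value % 256
--   return value
-- ===== SOURCE B (Python) =====
-- def holiday_hash(entry):
--   # positional polynomial: sum(ord(c) * 17^(n-i) mod 256) with one final mod
--   n = len(entry)
--   total = sum(ord(c) * pow(17, n - i, 256) for i, c in enumerate(entry))
--   return total % 256
-- ===== Notes on version B (the rewrite author's own statement) =====
-- stated objective: alternative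
-- what changed: Replaces the per-character running accumulator with step-by-step mod by a positional weighted sum ord(c)*17^(n-i) over enumerate, taking a single mod 256 at the end.
import Mathlib
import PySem

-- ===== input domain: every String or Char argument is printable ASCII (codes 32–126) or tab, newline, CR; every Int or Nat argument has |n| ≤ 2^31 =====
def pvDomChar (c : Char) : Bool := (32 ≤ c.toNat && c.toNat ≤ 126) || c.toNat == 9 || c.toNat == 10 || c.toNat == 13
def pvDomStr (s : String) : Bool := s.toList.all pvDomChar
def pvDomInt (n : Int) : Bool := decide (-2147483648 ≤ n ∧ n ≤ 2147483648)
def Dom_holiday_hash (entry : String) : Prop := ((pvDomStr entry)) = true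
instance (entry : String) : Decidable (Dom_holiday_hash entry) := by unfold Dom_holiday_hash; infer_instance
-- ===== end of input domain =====

-- B replaces A's running mod-accumulator with a positional weighted sum and one final mod (alternative decomposition, same cost class).

-- ===== PORT A =====
def holiday_hash (entry : String) : Int :=
  entry.toList.foldl
    (fun value letter => PySem.Int.mod ((value + (letter.toNat : Int)) * 17) 256) 0

-- ===== PORT B =====
def holiday_hash_alt (entry : String) : Int :=
  let n : Int := entry.toList.length
  -- exponent n - i is ≥ 1 for every index i of enumerate, so .toNat is exact here
  let total : Int :=
    (PySem.List.enumerate entry.toList 0).foldl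
      (fun acc p => acc + (p.2.toNat : Int) * PySem.Int.powMod 17 ((n - p.1).toNat) 256) 0
  PySem.Int.mod total 256

-- ===== PRECONDITION & SPEC =====
def Spec_holiday_hash (entry : String) (out : Int) : Prop := out = holiday_hash_alt entry
instance (entry : String) (out : Int) : Decidable (Spec_holiday_hash entry out) := by unfold Spec_holiday_hash; infer_instance

-- ===== CLAIM (what is proved, stated in full; the proofs are below) =====
def Claim_equal_holiday_hash : Prop := ∀ (entry : String), Dom_holiday_hash entry → Spec_holiday_hash entry (holiday_hash entry)

-- ===== LEMMAS AND PROOFS =====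

-- A's fold with a mod-reduced accumulator equals B's weighted sum with one final mod.
lemma holiday_hash_key (l : List Char) : ∀ (s v : Int), PySem.Int.mod v 256 = v →
    List.foldl (fun value letter => PySem.Int.mod ((value + (letter.toNat : Int)) * 17) 256) v l
    = PySem.Int.mod (v * 17 ^ l.length +
        (PySem.List.enumerate l s).foldl
          (fun acc p => acc + (p.2.toNat : Int) * 17 ^ ((s + l.length : Int) - p.1).toNat) 0) 256 := by
  induction l with
  | nil =>
      intro s v hv
      simpa using hv.symm
  | cons c t ih =>
      intro s v hv
      have h256 : (0:Int) < 256 := by norm_num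
      simp only [List.foldl_cons, PySem.List.enumerate_cons]
      have hexp : ((s + ((c :: t).length : Int)) - s).toNat = t.length + 1 := by
        simp only [List.length_cons]; omega
      have ih' := ih (s + 1) (PySem.Int.mod ((v + (c.toNat : Int)) * 17) 256)
        (by rw [PySem.Int.mod_eq_emod_of_pos h256, PySem.Int.mod_eq_emod_of_pos h256,
               Int.emod_emod_of_dvd _ dvd_rfl])
      rw [ih']
      -- rewrite both folds to plain sums and both mods to %
      rw [PySem.List.foldl_add, PySem.List.foldl_add,
          PySem.Int.mod_eq_emod_of_pos h256, PySem.Int.mod_eq_emod_of_pos h256,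
          PySem.Int.mod_eq_emod_of_pos h256]
      simp only [hexp]
      have hn : (s + 1 + (t.length : Int)) = s + ((c :: t).length : Int) := by
        simp; ring
      rw [hn]
      set S : Int := ((PySem.List.enumerate t (s + 1)).map
        (fun p => (p.2.toNat : Int) * 17 ^ ((s + ((c :: t).length : Int)) - p.1).toNat)).sum with hS
      have h1 : Int.ModEq 256 ((v + (c.toNat : Int)) * 17 % 256) ((v + (c.toNat : Int)) * 17) :=
        Int.emod_emod_of_dvd _ dvd_rfl
      have h2 : Int.ModEq 256
          ((v + (c.toNat : Int)) * 17 % 256 * 17 ^ t.length + (0 + S))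
          ((v + (c.toNat : Int)) * 17 * 17 ^ t.length + (0 + S)) :=
        (h1.mul_right _).add_right _
      calc ((v + (c.toNat : Int)) * 17 % 256 * 17 ^ t.length + (0 + S)) % 256
          = ((v + (c.toNat : Int)) * 17 * 17 ^ t.length + (0 + S)) % 256 := h2
        _ = (v * 17 ^ (c :: t).length + (0 + (c.toNat : Int) * 17 ^ (t.length + 1) + S)) % 256 := by
            congr 1
            simp only [List.length_cons]
            ring

-- pointwise congruent summands give congruent sums mod 256
lemma sum_map_modeq {α : Type} (g h : α → Int) :
    ∀ (L : List α), (∀ x, Int.ModEq 256 (g x) (h x)) →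
      Int.ModEq 256 (L.map g).sum (L.map h).sum := by
  intro L hgh
  induction L with
  | nil => rfl
  | cons x t ih => simpa using (hgh x).add ih

-- ===== VERDICT (by name: the statement is the Claim_ definition above) =====
theorem holiday_hash_spec : Claim_equal_holiday_hash := by
  intro entry _
  show holiday_hash entry = holiday_hash_alt entry
  unfold holiday_hash holiday_hash_alt
  rw [holiday_hash_key entry.toList 0 0 (by decide)]
  have h256 : (0:Int) < 256 := by norm_num
  simp only [zero_add, zero_mul]
  rw [PySem.List.foldl_add, PySem.List.foldl_add,
      PySem.Int.mod_eq_emod_of_pos h256, PySem.Int.mod_eq_emod_of_pos h256]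
  simp only [zero_add, PySem.Int.powMod, PySem.Int.mod_eq_emod_of_pos h256]
  refine (sum_map_modeq _ _ _ (fun p => ?_)).symm
  exact Int.ModEq.mul_left _ (Int.emod_emod_of_dvd _ (dvd_refl (256:Int)))
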